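-- pv_equiv track=rewrite | github.com/SzymonWesierski/AlgorytmicznaTeoriaGraf-w | Przeszukiwanie grafów oraz minimalne drzewa rozpinające/DFS/main.py | checkingForErrors
-- ===== SOURCE A (Python) =====
-- def checkingForErrors(array, array_len, start):
--     if start not in range(1, array_len):
--         return False
--
--     for i in range(array_len - 1) :
--         if array[i][0] != i + 1:
--             return False
--         for j in range(2, len(array[i])):
--             if array[i][j - 1] > array[i][j]:
--                 return False
--     return True
-- ===== SOURCE B (Python) =====
-- def checkingForErrors(array, array_len, start):
--     if start not in range(1, array_len):
--         return False
--     return all(row[0] == i + 1 and row[1:] == sorted(row[1:])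
--                for i, row in enumerate(array[:array_len - 1]))
-- ===== Notes on version B (the rewrite author's own statement) =====
-- stated objective: idiomatic
-- what changed: The nested index-driven scan of adjacent pairs is replaced by a single all() over enumerate of the row prefix, judging each row by comparing its tail with a sorted copy (row[1:] == sorted(row[1:])).
import Mathlib
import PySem

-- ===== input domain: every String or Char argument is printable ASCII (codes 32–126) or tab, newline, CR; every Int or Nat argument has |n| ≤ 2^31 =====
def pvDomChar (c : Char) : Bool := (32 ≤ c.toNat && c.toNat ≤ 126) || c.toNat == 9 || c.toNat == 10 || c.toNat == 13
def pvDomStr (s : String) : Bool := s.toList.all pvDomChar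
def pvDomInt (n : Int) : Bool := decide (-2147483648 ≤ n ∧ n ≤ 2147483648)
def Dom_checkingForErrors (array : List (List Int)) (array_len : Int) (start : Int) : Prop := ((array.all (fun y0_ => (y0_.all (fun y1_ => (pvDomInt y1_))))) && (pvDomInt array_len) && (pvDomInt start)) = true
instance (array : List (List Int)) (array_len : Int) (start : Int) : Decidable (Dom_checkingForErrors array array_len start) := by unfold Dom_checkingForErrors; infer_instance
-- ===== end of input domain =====

-- B replaces A's nested index loops by one all() over enumerate of the row prefix,
-- judging each row's tail by comparison with a sorted copy (idiomatic; same cost class).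

-- ===== PORT A =====
-- for i in range(array_len - 1): body with early 'return False' — an index recursion that
-- stops at the first failing row, exactly as Python's return does
def checkingForErrorsLoop (array : List (List Int)) (stop i : Int) : Bool :=
  if i < stop then
    let row := PySem.List.pyGetD array i []
    if PySem.List.pyGetD row 0 0 ≠ i + 1 then false
    else
      -- for j in range(2, len(array[i])): if array[i][j-1] > array[i][j]: return False
      if (PySem.List.pyRange 2 (row.length : Int) 1).all fun j =>
           if PySem.List.pyGetD row (j - 1) 0 > PySem.List.pyGetD row j 0 then false else true
      then checkingForErrorsLoop array stop (i + 1)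
      else false
  else true
termination_by (stop - i).toNat
decreasing_by omega

def checkingForErrors (array : List (List Int)) (array_len : Int) (start : Int) : Bool :=
  -- if start not in range(1, array_len): return False
  if 1 ≤ start ∧ start < array_len then checkingForErrorsLoop array (array_len - 1) 0
  else false

-- ===== PORT B =====
def checkingForErrors_alt (array : List (List Int)) (array_len : Int) (start : Int) : Bool :=
  if 1 ≤ start ∧ start < array_len then
    -- all(row[0] == i+1 and row[1:] == sorted(row[1:]) for i, row in enumerate(array[:array_len-1]))
    (PySem.List.enumerate (PySem.List.slice array none (some (array_len - 1))) 0).all fun p =>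
      let tail := PySem.List.slice p.2 (some 1) none
      decide (PySem.List.pyGetD p.2 0 0 = p.1 + 1) &&
      decide (tail = PySem.List.sorted tail (fun x => x) false)
  else false

-- ===== PRECONDITION & SPEC =====
-- Row i fully passes A's checks: present, nonempty, header i+1, tail nondecreasing.
def pyRowOK (array : List (List Int)) (i : Nat) : Bool :=
  decide (i < array.length) && decide (array.getD i [] ≠ []) &&
  decide ((array.getD i []).headD 0 = (i : Int) + 1) &&
  decide ((array.getD i []).tail.Pairwise (· ≤ ·))

-- Pre_ excludes exactly the inputs on which A raises IndexError: the guard passes and the scan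
-- reaches (all earlier rows fully pass) a row of the checked prefix that is missing or empty.
def Pre_checkingForErrors (array : List (List Int)) (array_len : Int) (start : Int) : Prop :=
  (1 ≤ start ∧ start < array_len) →
    ∀ i < min (array_len - 1).toNat (array.length + 1), (∀ i' < i, pyRowOK array i' = true) →
      (i < array.length ∧ array.getD i [] ≠ [])
instance (array : List (List Int)) (array_len : Int) (start : Int) : Decidable (Pre_checkingForErrors array array_len start) := by unfold Pre_checkingForErrors; infer_instance

def pvWitness_checkingForErrors : List (List Int) × Int × Int := ([[1, 2, 3], [2, 1, 5], [3]], 3, 2)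

def Spec_checkingForErrors (array : List (List Int)) (array_len : Int) (start : Int) (out : Bool) : Prop := out = checkingForErrors_alt array array_len start
instance (array : List (List Int)) (array_len : Int) (start : Int) (out : Bool) : Decidable (Spec_checkingForErrors array array_len start out) := by unfold Spec_checkingForErrors; infer_instance

-- ===== CLAIM (what is proved, stated in full; the proofs are below) =====
def Claim_equal_checkingForErrors : Prop := ∀ (array : List (List Int)) (array_len : Int) (start : Int), Dom_checkingForErrors array array_len start → Pre_checkingForErrors array array_len start → Spec_checkingForErrors array array_len start (checkingForErrors array array_len start)

-- ===== LEMMAS AND PROOFS =====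

theorem all_congr_mem {α : Type} {l : List α} {f g : α → Bool}
    (h : ∀ x ∈ l, f x = g x) : l.all f = l.all g := by
  induction l with
  | nil => rfl
  | cons a t ih =>
    simp only [List.all_cons, h a (by simp), ih (fun x hx => h x (by simp [hx]))]

theorem tail_sorted_iff (t : List Int) :
    (t = PySem.List.sorted t (fun x => x) false) ↔ t.Pairwise (· ≤ ·) := by
  constructor
  · intro he
    rw [he]
    simpa using PySem.List.sorted_pairwise t (fun x => x)
  · intro hp
    exact (PySem.List.sorted_eq_self_of_pairwise t (fun x => x) (by simpa using hp)).symm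

-- the early-exit index loop of port A equals an all() over the whole range
theorem checkingForErrorsLoop_eq_all (array : List (List Int)) (stop i : Int) :
    checkingForErrorsLoop array stop i =
    ((PySem.List.pyRange i stop 1).all fun i' =>
      let row := PySem.List.pyGetD array i' []
      if PySem.List.pyGetD row 0 0 ≠ i' + 1 then false
      else (PySem.List.pyRange 2 (row.length : Int) 1).all fun j =>
        if PySem.List.pyGetD row (j - 1) 0 > PySem.List.pyGetD row j 0 then false else true) := by
  rw [checkingForErrorsLoop]
  by_cases h : i < stop
  · rw [if_pos h, PySem.List.pyRange_one_cons h, List.all_cons,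
      checkingForErrorsLoop_eq_all array stop (i + 1)]
    by_cases hh : PySem.List.pyGetD (PySem.List.pyGetD array i []) 0 0 ≠ i + 1
    · simp [hh]
    · simp only [if_neg hh]
      split
      · next hin => rw [hin, Bool.true_and]
      · next hin => rw [Bool.eq_false_iff.mpr hin, Bool.false_and]
  · rw [if_neg h, PySem.List.pyRange_one_eq_nil (by omega)]
    simp
termination_by (stop - i).toNat
decreasing_by omega

-- A's adjacent-pair scan of a row equals B's "tail is its own sorted copy" judgement.
theorem row_scan_eq_sorted (row : List Int) :
    ((PySem.List.pyRange 2 (row.length : Int) 1).all fun j =>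
      if PySem.List.pyGetD row (j - 1) 0 > PySem.List.pyGetD row j 0 then false else true) =
    decide (row.tail = PySem.List.sorted row.tail (fun x => x) false) := by
  rcases row with _ | ⟨h, t⟩
  · decide
  · rw [Bool.eq_iff_iff]
    simp only [List.all_eq_true, decide_eq_true_iff, tail_sorted_iff, PySem.List.mem_pyRange_one,
      List.tail_cons]
    rw [← List.isChain_iff_pairwise, List.isChain_iff_getElem]
    constructor
    · intro hall i hi
      have h2 := hall ((i : Int) + 2) ⟨by omega, by push_cast [List.length_cons]; omega⟩
      rw [PySem.List.pyGetD_eq_getElem _ _ (by omega) (by push_cast [List.length_cons]; omega),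
          PySem.List.pyGetD_eq_getElem _ _ (by omega) (by push_cast [List.length_cons]; omega)] at h2
      split_ifs at h2 with hlt
      have e1 : ((i : Int) + 2 - 1).toNat = i + 1 := by omega
      have e2 : ((i : Int) + 2).toNat = i + 1 + 1 := by omega
      simp only [e1, e2, List.getElem_cons_succ] at hlt
      exact not_lt.mp hlt
    · intro hch j hj
      obtain ⟨hj2, hjlen⟩ := hj
      have hjlen' : j < (t.length : Int) + 1 := by
        push_cast [List.length_cons] at hjlen
        omega
      obtain ⟨i, rfl⟩ : ∃ i : Nat, j = (i : Int) + 2 := ⟨(j - 2).toNat, by omega⟩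
      rw [PySem.List.pyGetD_eq_getElem _ _ (by omega) (by push_cast [List.length_cons]; omega),
          PySem.List.pyGetD_eq_getElem _ _ (by omega) (by push_cast [List.length_cons]; omega)]
      have e1 : ((i : Int) + 2 - 1).toNat = i + 1 := by omega
      have e2 : ((i : Int) + 2).toNat = i + 1 + 1 := by omega
      simp only [e1, e2, List.getElem_cons_succ]
      rw [if_neg (not_lt.mpr (hch i (by omega)))]

-- per-index equality of the two row judgements, for any in-range index of array
theorem row_check_eq (array : List (List Int)) (j : Int) :
    (let row := PySem.List.pyGetD array j []
     if PySem.List.pyGetD row 0 0 ≠ j + 1 then false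
     else (PySem.List.pyRange 2 (row.length : Int) 1).all fun k =>
       if PySem.List.pyGetD row (k - 1) 0 > PySem.List.pyGetD row k 0 then false else true) =
    (let row := PySem.List.pyGetD array j []
     decide (PySem.List.pyGetD row 0 0 = j + 1) &&
     decide (PySem.List.slice row (some 1) none =
       PySem.List.sorted (PySem.List.slice row (some 1) none) (fun x => x) false)) := by
  simp only []
  by_cases hh : PySem.List.pyGetD (PySem.List.pyGetD array j []) 0 0 = j + 1
  · rw [if_neg (by simp [hh]), PySem.List.slice_from_one, row_scan_eq_sorted]
    simp [hh]
  · simp [hh]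

-- ===== VERDICT (by name: the statement is the Claim_ definition above) =====
theorem checkingForErrors_spec : Claim_equal_checkingForErrors := by
  intro array array_len start _ hpre
  unfold Spec_checkingForErrors checkingForErrors checkingForErrors_alt
  by_cases hg : 1 ≤ start ∧ start < array_len
  · simp only [if_pos hg]
    rw [checkingForErrorsLoop_eq_all]
    have hpre := hpre hg
    have h0 : (0 : Int) ≤ array_len - 1 := by omega
    rw [PySem.List.slice_to array h0]
    set m := (array_len - 1).toNat with hm
    have hcast : array_len - 1 = (m : Int) := by omega
    rw [hcast]
    by_cases hlen : m ≤ array.length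
    · -- every checked row is present: both sides scan the same m indices
      have htake : (array.take m).length = m := by simp; omega
      have hlen2 : PySem.List.len (array.take m) = (m : Int) := by
        simp [PySem.List.len, htake]
      rw [PySem.List.enumerate_eq_map_pyRange (array.take m) ([] : List Int), hlen2,
        List.all_map]
      apply all_congr_mem
      intro j hj
      rw [PySem.List.mem_pyRange_one] at hj
      obtain ⟨hj0, hjn⟩ := hj
      have hrow : PySem.List.pyGetD (array.take m) j [] = PySem.List.pyGetD array j [] := by
        rw [PySem.List.pyGetD_eq_getElem (array.take m) ([] : List Int) hj0
              (by rw [htake]; exact hjn),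
            PySem.List.pyGetD_eq_getElem array ([] : List Int) hj0 (by omega)]
        simp [List.getElem_take]
      simp only [Function.comp_def, hrow]
      exact row_check_eq array j
    · -- array shorter than the checked prefix: A hits a default row, B hits a failing row
      push Not at hlen
      have htake : array.take m = array := List.take_of_length_le (by omega)
      -- some row before array.length fails fully (else Pre_ would demand a row past the end)
      have hex : ∃ k, k < array.length ∧ pyRowOK array k = false := by
        by_contra hc
        push Not at hc
        have := (hpre array.length (Nat.lt_min.mpr ⟨by omega, by omega⟩)
          (fun i' hi' => by simpa using hc i' hi')).1
        omega
      obtain ⟨k, hk, hbad⟩ := hex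
      -- A's side is false at index (array.length : Int)
      have hA : ((PySem.List.pyRange 0 (m : Int) 1).all fun i =>
          let row := PySem.List.pyGetD array i []
          if PySem.List.pyGetD row 0 0 ≠ i + 1 then false
          else (PySem.List.pyRange 2 (row.length : Int) 1).all fun j =>
            if PySem.List.pyGetD row (j - 1) 0 > PySem.List.pyGetD row j 0 then false
            else true) = false := by
        rw [List.all_eq_false]
        refine ⟨(array.length : Int), by rw [PySem.List.mem_pyRange_one]; omega, ?_⟩
        have hdef : PySem.List.pyGetD array (array.length : Int) [] = [] := by
          simp [PySem.List.pyGetD_natCast]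
        simp only [hdef]
        rw [if_pos (by rw [PySem.List.pyGetD_zero]; simp only [List.getD_nil]; omega)]
        simp
      -- B's side is false at index k
      have hB : ((PySem.List.enumerate (array.take m) 0).all fun p =>
          decide (PySem.List.pyGetD p.2 0 0 = p.1 + 1) &&
          decide (PySem.List.slice p.2 (some 1) none =
            PySem.List.sorted (PySem.List.slice p.2 (some 1) none) (fun x => x) false)) =
          false := by
        rw [List.all_eq_false]
        refine ⟨((k : Int), array[k]), ?_, ?_⟩
        · rw [htake, PySem.List.mem_enumerate_iff]
          exact ⟨k, hk, by simp⟩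
        · have hget : PySem.List.pyGetD array[k] 0 0 = array[k].headD 0 := by
            cases harr : array[k] with
            | nil => simp [PySem.List.pyGetD_zero]
            | cons a t => simp [PySem.List.pyGetD_zero]
          simp only [pyRowOK, Bool.and_eq_false_iff, decide_eq_false_iff_not] at hbad
          have hgetD : array.getD k [] = array[k] := List.getD_eq_getElem _ _ hk
          simp only [Bool.not_eq_true, Bool.and_eq_false_iff, decide_eq_false_iff_not]
          rcases hbad with ((hb | hb) | hb) | hb
        -- the four failure reasons
          · omega
          · rw [hgetD] at hb
            rw [not_ne_iff] at hb
            left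
            rw [hb, PySem.List.pyGetD_zero]
            simp only [List.getD_nil]
            omega
          · rw [hgetD] at hb
            left
            rw [hget]
            exact hb
          · rw [hgetD] at hb
            right
            rw [PySem.List.slice_from_one, tail_sorted_iff]
            exact hb
      rw [hA, hB]
  · simp [hg]
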